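-- pv_equiv track=rewrite | github.com/sueszli/vector-database-benchmark | dataset/python-mutated/clinic.py | suffix_all_lines
-- ===== SOURCE A (Python) =====
-- def suffix_all_lines(s, suffix):
--     if False:
--         while True:
--             i = 10
--     "\n    Returns 's', with 'suffix' appended to all lines.\n\n    If the last line is empty, suffix is not appended\n    to it.  (If s is blank, returns s unchanged.)\n    "
--     split = s.split('\n')
--     last = split.pop()
--     final = []
--     for line in split:
--         final.append(line)
--         final.append(suffix)
--         final.append('\n')
--     if last:
--         final.append(last)
--         final.append(suffix)
--     return ''.join(final)
-- ===== SOURCE B (Python) =====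
-- def suffix_all_lines(s, suffix):
--     result = s.replace('\n', suffix + '\n')
--     if s and not s.endswith('\n'):
--         result += suffix
--     return result
-- ===== Notes on version B (the rewrite author's own statement) =====
-- stated objective: idiomatic
-- what changed: Replaces the split/pop/append-loop/join pipeline with a single str.replace inserting the suffix before every newline, plus one conditional append for a non-empty final line.
import Mathlib
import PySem

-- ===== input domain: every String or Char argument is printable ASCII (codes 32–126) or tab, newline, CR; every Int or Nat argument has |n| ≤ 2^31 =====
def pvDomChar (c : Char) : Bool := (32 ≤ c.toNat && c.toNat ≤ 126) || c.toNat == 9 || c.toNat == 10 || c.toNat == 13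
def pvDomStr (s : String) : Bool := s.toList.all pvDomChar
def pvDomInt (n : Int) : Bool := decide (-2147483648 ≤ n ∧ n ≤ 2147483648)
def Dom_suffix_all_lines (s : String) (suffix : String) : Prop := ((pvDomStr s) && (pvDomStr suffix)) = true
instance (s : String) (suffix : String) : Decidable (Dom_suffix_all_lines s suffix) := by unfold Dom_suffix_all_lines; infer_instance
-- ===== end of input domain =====

-- B replaces A's split/pop/loop/join pipeline by one str.replace plus a conditional append (idiomatic; same cost).

-- ===== PORT A =====
def suffix_all_lines (s : String) (suffix : String) : String :=
  match PySem.Str.split? s "\n" with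
  | none => ""  -- unreachable: the separator "\n" is non-empty, so split? always returns some
  | some split =>
    match PySem.List.pop? split with
    | none => ""  -- unreachable: s.split('\n') is never the empty list
    | some (last, rest) =>
      let final : List String := rest.foldl (fun acc line => acc ++ [line, suffix, "\n"]) []
      let final := if last ≠ "" then final ++ [last, suffix] else final
      PySem.Str.join "" final

-- ===== PORT B =====
def suffix_all_lines_alt (s : String) (suffix : String) : String :=
  let result := PySem.Str.replace s "\n" (suffix ++ "\n")
  if s ≠ "" ∧ PySem.Str.endswith s "\n" = false then result ++ suffix else result

-- ===== PRECONDITION & SPEC =====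
def Spec_suffix_all_lines (s : String) (suffix : String) (out : String) : Prop := out = suffix_all_lines_alt s suffix
instance (s : String) (suffix : String) (out : String) : Decidable (Spec_suffix_all_lines s suffix out) := by unfold Spec_suffix_all_lines; infer_instance

-- ===== CLAIM (what is proved, stated in full; the proofs are below) =====
def Claim_equal_suffix_all_lines : Prop := ∀ (s : String) (suffix : String), Dom_suffix_all_lines s suffix → Spec_suffix_all_lines s suffix (suffix_all_lines s suffix)

-- ===== LEMMAS AND PROOFS =====

-- split of a char list at '\n', carrying the current piece p (already in order)
def splitNlW (p : List Char) : List Char → List (List Char)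
  | [] => [p]
  | c :: t => if c = '\n' then p :: splitNlW [] t else splitNlW (p ++ [c]) t

-- character-level result of s.replace('\n', suf + '\n')
def repNl (suf : List Char) : List Char → List Char
  | [] => []
  | c :: t => if c = '\n' then suf ++ '\n' :: repNl suf t else c :: repNl suf t

-- A's assembly of the split pieces, at the character level
def assembleA (suf : List Char) (parts : List (List Char)) : List Char :=
  (parts.dropLast.flatMap (fun line => line ++ suf ++ ['\n'])) ++
    (if parts.getLastD [] ≠ [] then parts.getLastD [] ++ suf else [])

-- B's conditional final append, at the character level
def tailFix (suf l : List Char) : List Char :=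
  if l ≠ [] ∧ l.getLast? ≠ some '\n' then suf else []

lemma splitNlW_ne_nil (p : List Char) (l : List Char) : splitNlW p l ≠ [] := by
  induction l generalizing p with
  | nil => simp [splitNlW]
  | cons c t ih => simp only [splitNlW]; split <;> simp [ih]

lemma splitOn_go_inv (fuel : Nat) (l cur : List Char) (accs : List (List Char))
    (h : l.length < fuel) :
    PySem.Chars.splitOn.go ['\n'] fuel l cur accs = accs.reverse ++ splitNlW cur.reverse l := by
  induction fuel generalizing l cur accs with
  | zero => omega
  | succ n ih =>
    cases l with
    | nil => simp [PySem.Chars.splitOn.go, splitNlW]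
    | cons c t =>
      by_cases hc : c = '\n'
      · subst hc
        have hp : List.isPrefixOf ['\n'] ('\n' :: t) = true := by simp [List.isPrefixOf]
        simp only [PySem.Chars.splitOn.go, hp, if_pos, List.length_cons, List.length_nil,
          List.drop_succ_cons, List.drop_zero]
        rw [ih t [] (cur.reverse :: accs) (by simpa using Nat.lt_of_succ_lt_succ h)]
        simp [splitNlW]
      · have hp : List.isPrefixOf ['\n'] (c :: t) = false := by
          simp [List.isPrefixOf]; exact fun h' => (hc h'.symm).elim
        simp only [PySem.Chars.splitOn.go, hp]
        rw [if_neg (by simp), ih t (c :: cur) accs (by simpa using Nat.lt_of_succ_lt_succ h)]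
        simp [splitNlW, hc]

lemma splitOn_eq (l : List Char) : PySem.Chars.splitOn l ['\n'] = splitNlW [] l := by
  have := splitOn_go_inv (l.length + 1) l [] [] (by omega)
  simpa [PySem.Chars.splitOn] using this

lemma replace_go_inv (fuel : Nat) (l acc suf : List Char) (h : l.length ≤ fuel) :
    PySem.Chars.replace.go ['\n'] (suf ++ ['\n']) fuel l acc = acc.reverse ++ repNl suf l := by
  induction fuel generalizing l acc with
  | zero =>
    have hl : l = [] := by cases l <;> simp_all
    subst hl; simp [PySem.Chars.replace.go, repNl]
  | succ n ih =>
    cases l with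
    | nil => simp [PySem.Chars.replace.go, repNl]
    | cons c t =>
      by_cases hc : c = '\n'
      · subst hc
        have hp : List.isPrefixOf ['\n'] ('\n' :: t) = true := by simp [List.isPrefixOf]
        simp only [PySem.Chars.replace.go, hp, if_pos, List.length_cons, List.length_nil,
          List.drop_succ_cons, List.drop_zero]
        rw [ih t ((suf ++ ['\n']).reverse ++ acc) (by simpa using Nat.le_of_succ_le_succ h)]
        simp [repNl]
      · have hp : List.isPrefixOf ['\n'] (c :: t) = false := by
          simp [List.isPrefixOf]; exact fun h' => (hc h'.symm).elim
        simp only [PySem.Chars.replace.go, hp]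
        rw [if_neg (by simp), ih t (c :: acc) (by simpa using Nat.le_of_succ_le_succ h)]
        simp [repNl, hc]

lemma replace_eq (l suf : List Char) :
    PySem.Chars.replace l ['\n'] (suf ++ ['\n']) = repNl suf l := by
  have := replace_go_inv l.length l [] suf (le_refl _)
  simpa [PySem.Chars.replace] using this

lemma main_inv (suf : List Char) (l p : List Char) (hp : '\n' ∉ p) :
    assembleA suf (splitNlW p l) = p ++ repNl suf l ++ tailFix suf (p ++ l) := by
  induction l generalizing p with
  | nil =>
    simp only [splitNlW, assembleA, repNl, tailFix, List.append_nil]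
    by_cases hpn : p = []
    · subst hpn; simp
    · have hlast : p.getLast? ≠ some '\n' := fun hcontra => hp (List.mem_of_getLast? hcontra)
      simp [hpn, hlast]
  | cons c t ih =>
    by_cases hc : c = '\n'
    · subst hc
      have hne := splitNlW_ne_nil ([] : List Char) t
      rw [show splitNlW p ('\n' :: t) = p :: splitNlW [] t from by simp [splitNlW]]
      have hd : (p :: splitNlW [] t).dropLast = p :: (splitNlW [] t).dropLast := by
        cases hsp : splitNlW [] t with
        | nil => exact absurd hsp hne
        | cons x xs => simp
      have hl : (p :: splitNlW [] t).getLastD [] = (splitNlW [] t).getLastD [] := by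
        cases hsp : splitNlW [] t with
        | nil => exact absurd hsp hne
        | cons x xs => simp [List.getLastD]
      have hIH := ih [] (by simp)
      simp only [assembleA, List.nil_append, List.append_assoc] at hIH
      have htf : tailFix suf (p ++ '\n' :: t) = tailFix suf t := by
        unfold tailFix
        cases t with
        | nil => simp
        | cons x xs =>
          have h1 : (p ++ '\n' :: x :: xs).getLast? = (x :: xs).getLast? := by
            rw [List.getLast?_append_cons]
            simp [List.getLast?_cons_cons]
          simp [h1]
      simp only [assembleA, hd, hl, List.flatMap_cons, htf,
        show repNl suf ('\n' :: t) = suf ++ '\n' :: repNl suf t from by simp [repNl],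
        List.append_assoc, List.cons_append, List.nil_append]
      rw [hIH]
    · rw [show splitNlW p (c :: t) = splitNlW (p ++ [c]) t from by simp [splitNlW, hc]]
      rw [ih (p ++ [c]) (by
        intro h
        rcases List.mem_append.1 h with h | h
        · exact hp h
        · simp at h; exact hc h.symm)]
      rw [show repNl suf (c :: t) = c :: repNl suf t from by simp [repNl, hc]]
      have hpc : p ++ [c] ++ t = p ++ c :: t := by simp
      rw [hpc]
      simp

lemma endswith_iff_getLast (l : List Char) :
    PySem.Chars.endswith l ['\n'] = true ↔ l.getLast? = some '\n' := by
  rw [PySem.Chars.endswith_iff]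
  constructor
  · rintro ⟨pre, rfl⟩; simp
  · intro h
    cases hl : l.reverse with
    | nil => simp_all
    | cons x xs =>
      have hrev : l = xs.reverse ++ [x] := by
        have := congrArg List.reverse hl; simpa using this
      subst hrev
      simp at h
      exact ⟨xs.reverse, by simp [h]⟩

lemma flatten_intersperse_nil (xss : List (List Char)) :
    (List.intersperse [] xss).flatten = xss.flatten := by
  induction xss with
  | nil => simp
  | cons x xs ih =>
    cases xs with
    | nil => simp
    | cons y ys =>
      rw [List.intersperse_cons₂, List.flatten_cons, List.flatten_cons]
      rw [List.flatten_cons] at ih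
      simp only [List.nil_append, ih, List.flatten_cons]

lemma join_nil_toList (L : List String) :
    (PySem.Str.join "" L).toList = (L.map String.toList).flatten := by
  rw [PySem.Str.toList_join]
  show PySem.Chars.join ("" : String).toList _ = _
  have h0 : ("" : String).toList = [] := by simp
  rw [h0]
  show List.intercalate [] _ = _
  rw [List.intercalate]
  exact flatten_intersperse_nil _

lemma flatten_triple (suf : List Char) (init : List (List Char)) :
    (init.flatMap (fun a => [a, suf, ['\n']])).flatten
      = init.flatMap (fun line => line ++ (suf ++ ['\n'])) := by
  induction init with
  | nil => simp
  | cons x xs ih => simp [ih]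

lemma ofList_ne_empty_iff (l : List Char) : (String.ofList l ≠ "") ↔ l ≠ [] := by
  constructor
  · intro h hl; subst hl; simp at h
  · intro h hc
    have := congrArg String.toList hc
    simp at this
    exact h this

lemma toList_A (s suffix : String) :
    (suffix_all_lines s suffix).toList = assembleA suffix.toList (splitNlW [] s.toList) := by
  unfold suffix_all_lines
  have hsplit : PySem.Str.split? s "\n"
      = some ((splitNlW [] s.toList).map String.ofList) := by
    have hnl : ("\n" : String).toList = ['\n'] := by simp
    simp [PySem.Str.split?, PySem.Chars.split?, hnl, splitOn_eq]
  rw [hsplit]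
  have hne := splitNlW_ne_nil ([] : List Char) s.toList
  obtain ⟨init, last, hil⟩ : ∃ init last, splitNlW [] s.toList = init ++ [last] :=
    ⟨_, _, (List.dropLast_append_getLast hne).symm⟩
  rw [hil]
  rw [show (init ++ [last]).map String.ofList
      = init.map String.ofList ++ [String.ofList last] from by simp]
  simp only [PySem.List.pop?_last, PySem.List.foldl_append_eq_flatMap, List.nil_append]
  rw [show assembleA suffix.toList (init ++ [last])
      = init.flatMap (fun line => line ++ suffix.toList ++ ['\n'])
        ++ (if last ≠ [] then last ++ suffix.toList else []) from by
    unfold assembleA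
    rw [List.dropLast_concat,
      show (init ++ [last]).getLastD [] = last from by
        rw [List.getLastD_eq_getLast?, List.getLast?_concat]; rfl]]
  by_cases hl : last ≠ []
  · rw [if_pos ((ofList_ne_empty_iff last).2 hl), if_pos hl]
    rw [join_nil_toList]
    simp [List.map_flatMap, List.flatMap_map, String.toList_ofList, flatten_triple]
  · have hl' : last = [] := not_not.1 hl
    subst hl'
    rw [if_neg (by simp), if_neg (by simp)]
    rw [join_nil_toList]
    simp [List.map_flatMap, List.flatMap_map, String.toList_ofList, flatten_triple]

lemma toList_B (s suffix : String) :
    (suffix_all_lines_alt s suffix).toList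
      = repNl suffix.toList s.toList ++ tailFix suffix.toList s.toList := by
  unfold suffix_all_lines_alt tailFix
  have hrep : (PySem.Str.replace s "\n" (suffix ++ "\n")).toList
      = repNl suffix.toList s.toList := by
    rw [PySem.Str.toList_replace]
    have hnl : ("\n" : String).toList = ['\n'] := by simp
    have happ : (suffix ++ "\n").toList = suffix.toList ++ ['\n'] := by simp
    rw [hnl, happ, replace_eq]
  by_cases h1 : s ≠ "" ∧ PySem.Str.endswith s "\n" = false
  · rw [if_pos h1]
    have h2 : s.toList ≠ [] := by
      intro h
      exact h1.1 (by have := congrArg String.ofList h; simpa using this)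
    have h3 : s.toList.getLast? ≠ some '\n' := by
      intro hg
      have he : PySem.Chars.endswith s.toList ['\n'] = true := (endswith_iff_getLast _).2 hg
      have : PySem.Str.endswith s "\n" = true := by
        rw [PySem.Str.endswith_eq, show ("\n" : String).toList = ['\n'] from by simp]
        exact he
      rw [h1.2] at this; exact Bool.false_ne_true this
    rw [if_pos ⟨h2, h3⟩]
    simp [hrep]
  · rw [if_neg h1]
    have hfix : ¬(s.toList ≠ [] ∧ s.toList.getLast? ≠ some '\n') := by
      intro ⟨hne, hlast⟩
      apply h1
      constructor
      · intro hs; subst hs; simp at hne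
      · cases hew : PySem.Str.endswith s "\n" with
        | false => rfl
        | true =>
          exfalso
          apply hlast
          apply (endswith_iff_getLast _).1
          rw [PySem.Str.endswith_eq, show ("\n" : String).toList = ['\n'] from by simp] at hew
          exact hew
    rw [if_neg hfix]
    simp [hrep]

-- ===== VERDICT (by name: the statement is the Claim_ definition above) =====
theorem suffix_all_lines_spec : Claim_equal_suffix_all_lines := by
  intro s suffix _
  unfold Spec_suffix_all_lines
  have key : (suffix_all_lines s suffix).toList = (suffix_all_lines_alt s suffix).toList := by
    rw [toList_A, toList_B, main_inv suffix.toList s.toList [] (by simp)]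
    simp
  have := congrArg String.ofList key
  simpa using this
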